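-- pv_equiv track=rewrite | github.com/MrBrantCode/unitest_baseline | mut_generate/mist_train_cf/cf_49039/solution.py | f
-- ===== SOURCE A (Python) =====
-- def f(n):
--     """
--     Returns a list of length n where the element at each index i (1-indexed)
--     is the factorial of i if i is even, or the sum of integers from 1 to i if i is odd.
--
--     Args:
--     n (int): The length of the output list.
--
--     Returns:
--     list: A list of length n with the specified elements.
--     """
--     result = []
--     for i in range(n):
--         if (i + 1) % 2 == 0:
--             factorial = 1
--             for j in range(1, i + 2):
--                 factorial *= j
--             result.append(factorial)
--         else:
--             summation = 0
--             for j in range(1, i + 2):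
--                 summation += j
--             result.append(summation)
--     return result
-- ===== SOURCE B (Python) =====
-- def f(n):
--     result = []
--     fact = 1
--     for k in range(1, n + 1):
--         fact *= k
--         result.append(fact if k % 2 == 0 else k * (k + 1) // 2)
--     return result
-- ===== Notes on version B (the rewrite author's own statement) =====
-- stated objective: faster
-- what changed: Replaced the per-index inner loops (recomputing factorial/sum from scratch) with one pass keeping a running factorial and using the closed form k(k+1)/2 for the triangular numbers.
import Mathlib
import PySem

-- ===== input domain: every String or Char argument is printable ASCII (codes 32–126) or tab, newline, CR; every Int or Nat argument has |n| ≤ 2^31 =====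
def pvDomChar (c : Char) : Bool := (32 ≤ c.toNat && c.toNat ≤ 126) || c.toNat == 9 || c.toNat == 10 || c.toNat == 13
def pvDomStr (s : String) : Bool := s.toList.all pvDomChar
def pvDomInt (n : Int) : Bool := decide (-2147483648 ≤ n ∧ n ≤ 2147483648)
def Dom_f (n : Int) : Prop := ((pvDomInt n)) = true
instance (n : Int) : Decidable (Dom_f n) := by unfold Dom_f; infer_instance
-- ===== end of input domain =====

-- B replaces A's per-index inner loops by one pass with a running factorial and the
-- closed form k(k+1)//2 for the odd positions (objective: faster, O(n) vs O(n^2)).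

-- ===== PORT A =====
def f (n : Int) : List Int :=
  (PySem.List.pyRange 0 n 1).foldl (fun result i =>
    if PySem.Int.mod (i + 1) 2 = 0 then
      result ++ [(PySem.List.pyRange 1 (i + 2) 1).foldl (fun factorial j => factorial * j) 1]
    else
      result ++ [(PySem.List.pyRange 1 (i + 2) 1).foldl (fun summation j => summation + j) 0]) []

-- ===== PORT B =====
def f_alt (n : Int) : List Int :=
  ((PySem.List.pyRange 1 (n + 1) 1).foldl (fun (st : List Int × Int) k =>
      let fact := st.2 * k
      (st.1 ++ [if PySem.Int.mod k 2 = 0 then fact else PySem.Int.floordiv (k * (k + 1)) 2],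
       fact))
    (([] : List Int), (1 : Int))).1

-- ===== PRECONDITION & SPEC =====
def Spec_f (n : Int) (out : List Int) : Prop := out = f_alt n
instance (n : Int) (out : List Int) : Decidable (Spec_f n out) := by unfold Spec_f; infer_instance

-- ===== CLAIM (what is proved, stated in full; the proofs are below) =====
def Claim_equal_f : Prop := ∀ (n : Int), Dom_f n → Spec_f n (f n)

-- ===== LEMMAS AND PROOFS =====

-- reference values: Fc m = m!, Tc m = 1 + 2 + … + m, Lc m = the common output of length m
def Fc : Nat → Int
  | 0 => 1
  | m + 1 => Fc m * ((m : Int) + 1)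

def Tc : Nat → Int
  | 0 => 0
  | m + 1 => Tc m + ((m : Int) + 1)

def Lc : Nat → List Int
  | 0 => []
  | m + 1 => Lc m ++ [if PySem.Int.mod ((m : Int) + 1) 2 = 0 then Fc (m + 1) else Tc (m + 1)]

lemma fact_loop (m : Nat) :
    (PySem.List.pyRange 1 ((m : Int) + 1) 1).foldl (fun factorial j => factorial * j) 1 = Fc m := by
  induction m with
  | zero => simp [PySem.List.pyRange_one_eq_nil (le_refl (1:Int)), Fc]
  | succ m ih =>
      have h : ((m + 1 : Nat) : Int) + 1 = ((m : Int) + 1) + 1 := by push_cast; ring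
      rw [h, PySem.List.pyRange_one_succ_right (by omega), List.foldl_append, ih]
      simp [Fc]

lemma sum_loop (m : Nat) :
    (PySem.List.pyRange 1 ((m : Int) + 1) 1).foldl (fun summation j => summation + j) 0 = Tc m := by
  induction m with
  | zero => simp [PySem.List.pyRange_one_eq_nil (le_refl (1:Int)), Tc]
  | succ m ih =>
      have h : ((m + 1 : Nat) : Int) + 1 = ((m : Int) + 1) + 1 := by push_cast; ring
      rw [h, PySem.List.pyRange_one_succ_right (by omega), List.foldl_append, ih]
      simp [Tc]

lemma two_mul_Tc (m : Nat) : 2 * Tc m = (m : Int) * ((m : Int) + 1) := by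
  induction m with
  | zero => simp [Tc]
  | succ m ih => simp only [Tc]; push_cast; ring_nf; push_cast at ih ⊢; linarith

lemma tri_closed (m : Nat) :
    PySem.Int.floordiv ((m : Int) * ((m : Int) + 1)) 2 = Tc m := by
  rw [← two_mul_Tc, PySem.Int.floordiv_eq_ediv_of_pos (by norm_num)]
  exact Int.mul_ediv_cancel_left _ (by norm_num)

lemma fA (m : Nat) :
    (PySem.List.pyRange 0 (m : Int) 1).foldl (fun result i =>
      if PySem.Int.mod (i + 1) 2 = 0 then
        result ++ [(PySem.List.pyRange 1 (i + 2) 1).foldl (fun factorial j => factorial * j) 1]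
      else
        result ++ [(PySem.List.pyRange 1 (i + 2) 1).foldl (fun summation j => summation + j) 0]) []
    = Lc m := by
  induction m with
  | zero => simp [PySem.List.pyRange_one_eq_nil (le_refl (0:Int)), Lc]
  | succ m ih =>
      have h : ((m + 1 : Nat) : Int) = (m : Int) + 1 := by push_cast; ring
      rw [h, PySem.List.pyRange_one_succ_right (by omega), List.foldl_append, ih]
      have h2 : (m : Int) + 2 = ((m + 1 : Nat) : Int) + 1 := by push_cast; ring
      simp only [List.foldl_cons, List.foldl_nil, h2, fact_loop, sum_loop, Lc]
      split_ifs <;> rfl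

lemma fB (m : Nat) :
    (PySem.List.pyRange 1 ((m : Int) + 1) 1).foldl (fun (st : List Int × Int) k =>
        let fact := st.2 * k
        (st.1 ++ [if PySem.Int.mod k 2 = 0 then fact else PySem.Int.floordiv (k * (k + 1)) 2],
         fact))
      (([] : List Int), (1 : Int))
    = (Lc m, Fc m) := by
  induction m with
  | zero => simp [PySem.List.pyRange_one_eq_nil (le_refl (1:Int)), Lc, Fc]
  | succ m ih =>
      have h : ((m + 1 : Nat) : Int) + 1 = ((m : Int) + 1) + 1 := by push_cast; ring
      rw [h, PySem.List.pyRange_one_succ_right (by omega), List.foldl_append, ih]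
      have h3 : ((m : Int) + 1) * (((m : Int) + 1) + 1) = ((m+1 : Nat) : Int) * (((m+1 : Nat) : Int) + 1) := by
        push_cast; ring
      simp only [List.foldl_cons, List.foldl_nil, Lc, Fc, h3, tri_closed]

lemma f_nonpos (n : Int) (h : n ≤ 0) : f n = [] := by
  unfold f; rw [PySem.List.pyRange_one_eq_nil h]; rfl

lemma f_alt_nonpos (n : Int) (h : n ≤ 0) : f_alt n = [] := by
  unfold f_alt; rw [PySem.List.pyRange_one_eq_nil (by omega)]; rfl

-- ===== VERDICT (by name: the statement is the Claim_ definition above) =====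
theorem f_spec : Claim_equal_f := by
  intro n _
  unfold Spec_f
  by_cases h : n ≤ 0
  · rw [f_nonpos n h, f_alt_nonpos n h]
  · rw [not_le] at h
    obtain ⟨m, rfl⟩ : ∃ m : Nat, n = (m : Int) := ⟨n.toNat, by omega⟩
    show f (m : Int) = f_alt (m : Int)
    unfold f f_alt
    rw [fA, fB]
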